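-- pv_equiv track=rewrite | github.com/i2bc/SCAN_IDR | scripts/inputAFscripts/CommonAndGapSpecies.py | RemoveNotFoundSpecies
-- ===== SOURCE A (Python) =====
-- def RemoveNotFoundSpecies(d):
--     """
--     Create a unpaired msa with output entirely gapped sequences/"NotFound" in all msa.
--     """
--     nbSpecies2check = len(d[0])
--     d_new_msa={x:{} for x in d}
--     for i_sp in range(nbSpecies2check):
--         Found=False
--         for i_msa in d:
--             if "NotFound" not in d[i_msa][i_sp][0]:
--                 Found=True
--         if Found:
--             for i_msa in d:
--                 d_new_msa[i_msa][i_sp] = d[i_msa][i_sp]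
--     return d_new_msa
-- ===== SOURCE B (Python) =====
-- def RemoveNotFoundSpecies(d):
--     """
--     Create a unpaired msa with output entirely gapped sequences/"NotFound" in all msa.
--     """
--     n = len(d[0])
--     # candidate elimination: start with every species removable, and let each msa
--     # keep only the species it also fails to find; survivors are removed at the end
--     dead = set(range(n))
--     for i_msa in d:
--         dead = {i_sp for i_sp in dead if "NotFound" in d[i_msa][i_sp][0]}
--     d_new_msa = {}
--     for i_msa in d:
--         d_new_msa[i_msa] = {i_sp: d[i_msa][i_sp] for i_sp in range(n) if i_sp not in dead}
--     return d_new_msa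
-- ===== Notes on version B (the rewrite author's own statement) =====
-- stated objective: alternative
-- what changed: Replaces A's species-outer loop with a per-species Found flag by candidate elimination: a single msa-outer pass maintains a shrinking set of species that are still 'NotFound' in every msa seen so far, then the result is rebuilt per msa excluding that set.
-- outside the precondition, e.g. on RemoveNotFoundSpecies({}): A raises KeyError, B raises KeyError
import Mathlib
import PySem

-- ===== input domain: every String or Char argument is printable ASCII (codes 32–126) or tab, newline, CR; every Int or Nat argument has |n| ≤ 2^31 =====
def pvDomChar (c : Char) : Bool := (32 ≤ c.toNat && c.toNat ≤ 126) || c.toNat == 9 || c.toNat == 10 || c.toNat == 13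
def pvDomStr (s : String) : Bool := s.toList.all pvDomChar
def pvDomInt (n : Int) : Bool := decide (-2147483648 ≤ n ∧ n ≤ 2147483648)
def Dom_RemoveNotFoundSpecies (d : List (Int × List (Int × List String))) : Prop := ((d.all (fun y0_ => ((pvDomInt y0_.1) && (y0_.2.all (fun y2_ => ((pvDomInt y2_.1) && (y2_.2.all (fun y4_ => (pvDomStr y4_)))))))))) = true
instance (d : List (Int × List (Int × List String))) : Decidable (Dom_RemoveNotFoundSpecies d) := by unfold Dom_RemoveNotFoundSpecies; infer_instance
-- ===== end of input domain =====

-- B replaces A's species-outer flag loop by candidate elimination: one msa-outer pass shrinks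
-- the set of species 'NotFound' everywhere so far, then the result excludes it (objective: alternative).
-- Shared marshalling of the dict-of-dicts argument (assoc list → PySem.Dict, Python dict semantics).
def pyDictOfAssoc (d : List (Int × List (Int × List String))) :
    PySem.Dict Int (PySem.Dict Int (List String)) :=
  PySem.Dict.ofList (d.map (fun p => (p.1, PySem.Dict.ofList p.2)))

-- ===== PORT A =====
def RemoveNotFoundSpecies (d : List (Int × List (Int × List String))) : List (Int × List (Int × List String)) :=
  let dd := pyDictOfAssoc d
  -- nbSpecies2check = len(d[0]); d[0] missing (KeyError) is excluded by Pre_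
  let n : Nat := (dd.getD 0 PySem.Dict.empty).size
  -- d_new_msa = {x: {} for x in d}
  let init : PySem.Dict Int (PySem.Dict Int (List String)) :=
    dd.items.foldl (fun r p => r.insert p.1 PySem.Dict.empty) PySem.Dict.empty
  let res := (List.range n).foldl (fun r i =>
    -- Found flag loop; missing key / empty list (KeyError/IndexError) excluded by Pre_
    let found := dd.items.foldl (fun f p =>
      if !(PySem.Str.isIn "NotFound" ((PySem.List.pyGet? (p.2.getD (i : Int) []) 0).getD "")) then true else f) false
    if found then
      dd.items.foldl (fun r p =>
        r.insert p.1 ((r.getD p.1 PySem.Dict.empty).insert (i : Int) (p.2.getD (i : Int) []))) r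
    else r) init
  res.items.map (fun p => (p.1, p.2.items))

-- ===== PORT B =====
-- the Python set 'dead' is modelled as the list of its distinct elements (membership only)
def RemoveNotFoundSpecies_alt (d : List (Int × List (Int × List String))) : List (Int × List (Int × List String)) :=
  let dd := pyDictOfAssoc d
  let n : Nat := (dd.getD 0 PySem.Dict.empty).size
  let dead : List Nat := dd.items.foldl (fun dead p =>
      dead.filter (fun i => PySem.Str.isIn "NotFound" ((PySem.List.pyGet? (p.2.getD (i : Int) []) 0).getD "")))
    (List.range n)
  dd.items.map (fun p => (p.1,
    ((List.range n).filter (fun i => !(dead.contains i))).map (fun i : Nat => ((i : Int), p.2.getD (i : Int) []))))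

-- ===== PRECONDITION & SPEC =====
-- Pre_ excludes exactly the inputs where the Python raises: a missing key 0 (KeyError on len(d[0])),
-- a species index 0..len(d[0])-1 missing from some msa (KeyError), or an empty sequence list ([0] IndexError).
def Pre_RemoveNotFoundSpecies (d : List (Int × List (Int × List String))) : Prop :=
  ((pyDictOfAssoc d).get? 0).isSome = true ∧
  ∀ p ∈ (pyDictOfAssoc d).items, ∀ i ∈ List.range ((pyDictOfAssoc d).getD 0 PySem.Dict.empty).size,
    (p.2.get? (i : Int)).isSome = true ∧ p.2.getD (i : Int) [] ≠ []
instance (d : List (Int × List (Int × List String))) : Decidable (Pre_RemoveNotFoundSpecies d) := by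
  unfold Pre_RemoveNotFoundSpecies; infer_instance

def pvWitness_RemoveNotFoundSpecies : (List (Int × List (Int × List String))) :=
  [(0, [(0, ["NotFound"]), (1, ["abc"])]), (7, [(0, ["xyz"]), (1, ["NotFound"])])]

def Spec_RemoveNotFoundSpecies (d : List (Int × List (Int × List String))) (out : List (Int × List (Int × List String))) : Prop := out = RemoveNotFoundSpecies_alt d
instance (d : List (Int × List (Int × List String))) (out : List (Int × List (Int × List String))) : Decidable (Spec_RemoveNotFoundSpecies d out) := by unfold Spec_RemoveNotFoundSpecies; infer_instance

-- ===== CLAIM (what is proved, stated in full; the proofs are below) =====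
def Claim_equal_RemoveNotFoundSpecies : Prop := ∀ (d : List (Int × List (Int × List String))), Dom_RemoveNotFoundSpecies d → Pre_RemoveNotFoundSpecies d → Spec_RemoveNotFoundSpecies d (RemoveNotFoundSpecies d)

-- ===== LEMMAS AND PROOFS =====

theorem foldl_flag {α : Type} (q : α → Bool) :
    ∀ (l : List α) (b : Bool), l.foldl (fun f p => if q p then true else f) b = (b || l.any q) := by
  intro l
  induction l with
  | nil => simp
  | cons p l ih =>
    intro b
    simp only [List.foldl_cons, List.any_cons, ih]
    cases q p <;> simp

theorem foldl_filter {α β : Type} (q : β → α → Bool) :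
    ∀ (l : List β) (init : List α),
      l.foldl (fun acc p => acc.filter (q p)) init
        = init.filter (fun i => l.all (fun p => q p i)) := by
  intro l
  induction l with
  | nil => intro init; simp
  | cons p l ih =>
    intro init
    simp only [List.foldl_cons, ih, List.filter_filter, List.all_cons]
    apply List.filter_congr
    intro i _
    cases q p i <;> simp

theorem mid_getD {ν : Type} (pre suf : List (Int × ν)) (k : Int) (v d0 : ν)
    (h : ((pre ++ (k, v) :: suf).map Prod.fst).Nodup) :
    (PySem.Dict.mk (pre ++ (k, v) :: suf)).getD k d0 = v := by
  apply PySem.Dict.getD_of_mem_items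
  · simp
  · simpa [PySem.Dict.keys] using h

theorem mid_insert {ν : Type} (pre suf : List (Int × ν)) (k : Int) (v w : ν)
    (h : ((pre ++ (k, v) :: suf).map Prod.fst).Nodup) :
    (PySem.Dict.mk (pre ++ (k, v) :: suf)).insert k w = PySem.Dict.mk (pre ++ (k, w) :: suf) := by
  have h' := h
  simp only [List.map_append, List.map_cons, List.nodup_append, List.nodup_cons] at h'
  obtain ⟨hpre, ⟨hksuf, hsufnd⟩, hdisj⟩ := h'
  have hpk : ∀ p ∈ pre, p.1 ≠ k := fun p hp =>
    hdisj p.1 (List.mem_map_of_mem hp) k (List.mem_cons_self) 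
  have hsk : ∀ p ∈ suf, p.1 ≠ k := fun p hp hq =>
    hksuf (hq ▸ List.mem_map_of_mem hp)
  have hc : (PySem.Dict.mk (pre ++ (k, v) :: suf)).contains k = true := by
    rw [PySem.Dict.contains_eq_decide_mem_keys]
    simp [PySem.Dict.keys]
  apply PySem.Dict.ext
  rw [PySem.Dict.items_insert_of_contains _ _ hc]
  show List.map _ (pre ++ (k, v) :: suf) = _
  rw [List.map_append, List.map_cons]
  have e1 : pre.map (fun p => if (p.1 == k) = true then (k, w) else p) = pre := by
    conv_rhs => rw [← List.map_id pre]
    apply List.map_congr_left; intro p hp; simp [hpk p hp]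
  have e2 : suf.map (fun p => if (p.1 == k) = true then (k, w) else p) = suf := by
    conv_rhs => rw [← List.map_id suf]
    apply List.map_congr_left; intro p hp; simp [hsk p hp]
  rw [e1, e2]
  simp

theorem fresh_insert {ν : Type} (m : List (Int × ν)) (k : Int) (w : ν)
    (h : k ∉ m.map Prod.fst) :
    (PySem.Dict.mk m).insert k w = PySem.Dict.mk (m ++ [(k, w)]) := by
  apply PySem.Dict.ext
  apply PySem.Dict.items_insert_of_not_contains
  rw [PySem.Dict.contains_eq_decide_mem_keys]
  simpa [PySem.Dict.keys] using h

theorem copy_fold (i : Int) (val : Int × PySem.Dict Int (List String) → List String) :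
    ∀ (l pre : List (Int × PySem.Dict Int (List String)))
      (g : Int × PySem.Dict Int (List String) → PySem.Dict Int (List String)),
      ((pre ++ l.map (fun p => (p.1, g p))).map Prod.fst).Nodup →
      l.foldl (fun r p =>
          r.insert p.1 ((r.getD p.1 PySem.Dict.empty).insert i (val p)))
        (PySem.Dict.mk (pre ++ l.map (fun p => (p.1, g p))))
      = PySem.Dict.mk (pre ++ l.map (fun p => (p.1, (g p).insert i (val p)))) := by
  intro l
  induction l with
  | nil => intro pre g _; rfl
  | cons p l ih =>
    intro pre g hnd
    simp only [List.map_cons, List.foldl_cons]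
    rw [mid_getD pre (l.map (fun p => (p.1, g p))) p.1 (g p) PySem.Dict.empty (by simpa using hnd)]
    rw [mid_insert pre (l.map (fun p => (p.1, g p))) p.1 (g p) ((g p).insert i (val p)) (by simpa using hnd)]
    have ha : pre ++ (p.1, (g p).insert i (val p)) :: l.map (fun p => (p.1, g p))
        = (pre ++ [(p.1, (g p).insert i (val p))]) ++ l.map (fun p => (p.1, g p)) := by simp
    rw [ha, ih (pre ++ [(p.1, (g p).insert i (val p))]) g (by simpa using hnd)]
    simp

theorem init_fold (l : List (Int × PySem.Dict Int (List String)))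
    (hk : (l.map Prod.fst).Nodup) :
    l.foldl (fun r p => r.insert p.1 (PySem.Dict.empty : PySem.Dict Int (List String))) PySem.Dict.empty
      = PySem.Dict.mk (l.map (fun p => (p.1, PySem.Dict.empty))) := by
  apply PySem.Dict.ext
  rw [PySem.Dict.items_foldl_insert_fresh l Prod.fst (fun _ => PySem.Dict.empty) PySem.Dict.empty
    (fun a _ => PySem.Dict.contains_empty a.1) hk]
  rfl

theorem range_fold (l : List (Int × PySem.Dict Int (List String)))
    (hk : (l.map Prod.fst).Nodup)
    (alive : Nat → Bool) (vl : Int × PySem.Dict Int (List String) → Nat → List String) :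
    ∀ n : Nat,
      (List.range n).foldl (fun r i =>
          if alive i then
            l.foldl (fun r p =>
              r.insert p.1 ((r.getD p.1 PySem.Dict.empty).insert (i : Int) (vl p i))) r
          else r)
        (PySem.Dict.mk (l.map (fun p => (p.1, PySem.Dict.empty))))
      = PySem.Dict.mk (l.map (fun p =>
          (p.1, PySem.Dict.mk (((List.range n).filter alive).map (fun i : Nat => ((i : Int), vl p i)))))) := by
  intro n
  induction n with
  | zero =>
    simp only [List.range_zero, List.foldl_nil, List.filter_nil, List.map_nil]
    rfl
  | succ n ih =>
    rw [List.range_succ, List.foldl_append, ih, List.filter_append]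
    by_cases ha : alive n = true
    · simp only [List.foldl_cons, List.foldl_nil, ha, if_pos]
      have hcf := copy_fold (n : Int) (fun p => vl p n) l []
          (fun p => PySem.Dict.mk (((List.range n).filter alive).map (fun i : Nat => ((i : Int), vl p i))))
          (by simpa [List.map_map, Function.comp] using hk)
      simp only [List.nil_append] at hcf
      rw [hcf]
      congr 1
      apply List.map_congr_left
      intro p _
      rw [fresh_insert _ (n : Int) (vl p n) ?_]
      · simp [ha]
      · simp only [List.map_map]
        intro hmem
        obtain ⟨j, hj, hje⟩ := List.mem_map.mp hmem
        have hjn : j < n := List.mem_range.mp (List.mem_filter.mp hj).1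
        simp at hje
        omega
    · simp [List.foldl_cons, ha]

-- B's survivors of the dead-set narrowing are exactly A's 'Found' species
theorem dead_filter_eq (l : List (Int × PySem.Dict Int (List String))) (n : Nat)
    (q : Int × PySem.Dict Int (List String) → Nat → Bool) :
    (List.range n).filter (fun i =>
        !((l.foldl (fun dead p => dead.filter (fun i => q p i)) (List.range n)).contains i))
      = (List.range n).filter (fun i => l.any (fun p => !(q p i))) := by
  rw [foldl_filter]
  apply List.filter_congr
  intro i hi
  by_cases h : l.all (fun p => q p i) = true
  · simp [List.mem_filter, hi, h]
    simpa using h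
  · simp [List.mem_filter, h]
    simpa [List.all_eq_not_any_not] using h

-- ===== VERDICT (by name: the statement is the Claim_ definition above) =====
theorem RemoveNotFoundSpecies_spec : Claim_equal_RemoveNotFoundSpecies := by
  intro d _ _
  unfold Spec_RemoveNotFoundSpecies RemoveNotFoundSpecies RemoveNotFoundSpecies_alt
  have hk : ((pyDictOfAssoc d).items.map Prod.fst).Nodup := by
    simpa [pyDictOfAssoc, PySem.Dict.keys] using
      PySem.Dict.nodup_keys_ofList (d.map (fun p => (p.1, PySem.Dict.ofList p.2)))
  simp only [foldl_flag, Bool.false_or]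
  rw [init_fold (pyDictOfAssoc d).items hk]
  rw [range_fold (pyDictOfAssoc d).items hk
      (fun i => (pyDictOfAssoc d).items.any (fun p =>
        !(PySem.Str.isIn "NotFound" ((PySem.List.pyGet? (p.2.getD (i : Int) []) 0).getD ""))))
      (fun p i => p.2.getD (i : Int) [])
      ((pyDictOfAssoc d).getD 0 PySem.Dict.empty).size]
  rw [dead_filter_eq (pyDictOfAssoc d).items ((pyDictOfAssoc d).getD 0 PySem.Dict.empty).size
      (fun p i => PySem.Str.isIn "NotFound" ((PySem.List.pyGet? (p.2.getD (i : Int) []) 0).getD ""))]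
  simp [List.map_map, Function.comp]
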